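-- pv_equiv track=rewrite | github.com/DevinAdvani/Guitar-Anki-Deck | V1.py | chord_to_chromatic_notes
-- ===== SOURCE A (Python) =====
-- notes = ["C","C#","D","D#","E","F","F#","G","G#","A","A#","B"]
--
-- def chord_to_chromatic_notes(input_chord_list):
--     output = []
--     for i in range(0, 12):
--         chord = []
--         for k in input_chord_list:
--             chord.append(notes[(k+i)%12])
--         output.append(set(chord))
--     return output
-- ===== SOURCE B (Python) =====
-- notes = ["C","C#","D","D#","E","F","F#","G","G#","A","A#","B"]
--
-- def chord_to_chromatic_notes(input_chord_list):
--     nxt = {notes[i]: notes[(i + 1) % 12] for i in range(12)}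
--     base = []
--     for k in input_chord_list:
--         n = notes[k % 12]
--         if n not in base:
--             base.append(n)
--     output = [set(base)]
--     prev = base
--     for _ in range(11):
--         prev = [nxt[n] for n in prev]
--         output.append(set(prev))
--     return output
-- ===== Notes on version B (the rewrite author's own statement) =====
-- stated objective: faster
-- what changed: B deduplicates the input into the base note set once (one pass over the input), then derives each of the remaining 11 chromatic positions incrementally by mapping the previous set through a precomputed next-semitone dictionary, instead of re-scanning the whole input and re-deduplicating for every one of the 12 positions.
import Mathlib
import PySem

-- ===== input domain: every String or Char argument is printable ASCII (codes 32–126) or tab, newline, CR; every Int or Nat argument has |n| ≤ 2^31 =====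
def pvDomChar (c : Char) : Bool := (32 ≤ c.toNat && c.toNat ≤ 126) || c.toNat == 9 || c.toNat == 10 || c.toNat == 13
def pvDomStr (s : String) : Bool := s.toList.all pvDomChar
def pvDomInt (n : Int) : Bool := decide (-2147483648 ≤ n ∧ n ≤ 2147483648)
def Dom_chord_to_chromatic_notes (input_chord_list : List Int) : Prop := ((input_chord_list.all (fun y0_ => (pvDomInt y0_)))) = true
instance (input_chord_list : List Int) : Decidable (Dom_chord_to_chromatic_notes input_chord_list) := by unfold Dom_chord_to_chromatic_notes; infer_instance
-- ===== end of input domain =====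

-- B deduplicates the input into the base chromatic set once and derives the other 11 positions
-- incrementally through a precomputed next-semitone map, instead of rescanning the input for each of the 12 positions.

-- ===== PORT A =====
def pvNotes : List String := ["C","C#","D","D#","E","F","F#","G","G#","A","A#","B"]

def chord_to_chromatic_notes (input_chord_list : List Int) : List (List String) :=
  (PySem.List.pyRange 0 12 1).foldl (fun output i =>
    let chord := input_chord_list.foldl (fun chord k =>
      chord ++ [PySem.List.pyGetD pvNotes (PySem.Int.mod (k + i) 12) ""]) []
    output ++ [PySem.Set.ofList chord]) []

-- ===== PORT B =====
-- nxt = {notes[i]: notes[(i + 1) % 12] for i in range(12)}  (a constant dict, hoisted as a helper)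
def pvNext : PySem.Dict String String :=
  (PySem.List.pyRange 0 12 1).foldl (fun d i =>
    PySem.Dict.insert d (PySem.List.pyGetD pvNotes i "")
      (PySem.List.pyGetD pvNotes (PySem.Int.mod (i + 1) 12) "")) PySem.Dict.empty

def chord_to_chromatic_notes_alt (input_chord_list : List Int) : List (List String) :=
  let base := input_chord_list.foldl (fun b k =>
      let n := PySem.List.pyGetD pvNotes (PySem.Int.mod k 12) ""
      if b.contains n then b else b ++ [n]) []
  let st := (PySem.List.pyRange 0 11 1).foldl
      (fun (st : List (List String) × List String) _ =>
        let prev := st.2.map (fun n => (PySem.Dict.get? pvNext n).getD "")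
        (st.1 ++ [PySem.Set.ofList prev], prev))
      ([PySem.Set.ofList base], base)
  st.1

-- ===== PRECONDITION & SPEC =====
def Spec_chord_to_chromatic_notes (input_chord_list : List Int) (out : List (List String)) : Prop := out = chord_to_chromatic_notes_alt input_chord_list
instance (input_chord_list : List Int) (out : List (List String)) : Decidable (Spec_chord_to_chromatic_notes input_chord_list out) := by unfold Spec_chord_to_chromatic_notes; infer_instance

-- ===== CLAIM (what is proved, stated in full; the proofs are below) =====
def Claim_equal_chord_to_chromatic_notes : Prop := ∀ (input_chord_list : List Int), Dom_chord_to_chromatic_notes input_chord_list → Spec_chord_to_chromatic_notes input_chord_list (chord_to_chromatic_notes input_chord_list)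

-- ===== LEMMAS AND PROOFS =====

-- The lookup function of B's next-semitone dict.
def pvF (n : String) : String := (PySem.Dict.get? pvNext n).getD ""

-- The set of notes the chord hits at chromatic offset i (Python set(), first-occurrence order).
def pvS (xs : List Int) (i : Int) : List String :=
  PySem.Set.ofList (xs.map (fun k => PySem.List.pyGetD pvNotes (PySem.Int.mod (k + i) 12) ""))

lemma pvNotes_nodup : pvNotes.Nodup := by decide

lemma pvMod12 : ∀ a : Int, PySem.Int.mod a 12 = a % 12 :=
  fun a => PySem.Int.mod_eq_emod_of_pos (by norm_num)

lemma pvNext_items : pvNext.items =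
    (PySem.List.pyRange 0 12 1).map (fun i =>
      (PySem.List.pyGetD pvNotes i "", PySem.List.pyGetD pvNotes (PySem.Int.mod (i + 1) 12) "")) := by
  unfold pvNext
  rw [PySem.Dict.items_foldl_insert_fresh]
  · rfl
  · intro a _; exact PySem.Dict.contains_empty _
  · have h : (PySem.List.pyRange 0 12 1).map (fun i => PySem.List.pyGetD pvNotes i "") = pvNotes := by decide
    rw [h]; exact pvNotes_nodup

lemma pvNext_keys_nodup : pvNext.keys.Nodup := by
  unfold pvNext
  exact PySem.Dict.nodup_keys_foldl_insert_key _ _ _ _ (PySem.Dict.nodup_keys_empty)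

lemma pvGetD_natIdx (i : Nat) (hi : i < pvNotes.length) :
    PySem.List.pyGetD pvNotes (i : Int) "" = pvNotes[i] := by
  rw [PySem.List.pyGetD_natCast, List.getD_eq_getElem?_getD, List.getElem?_eq_getElem hi]; rfl

lemma pvF_note (j : Nat) (hj : j < 12) :
    pvF (PySem.List.pyGetD pvNotes (j : Int) "")
      = PySem.List.pyGetD pvNotes (PySem.Int.mod ((j : Int) + 1) 12) "" := by
  unfold pvF
  have hmem : ((PySem.List.pyGetD pvNotes (j : Int) "",
      PySem.List.pyGetD pvNotes (PySem.Int.mod ((j : Int) + 1) 12) "")) ∈ pvNext.items := by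
    rw [pvNext_items]
    exact List.mem_map.2 ⟨(j : Int), PySem.List.mem_pyRange_one.2 (by omega), rfl⟩
  rw [PySem.Dict.get?_of_mem_items _ hmem pvNext_keys_nodup]
  rfl

lemma pvF_step (m : Int) :
    pvF (PySem.List.pyGetD pvNotes (PySem.Int.mod m 12) "")
      = PySem.List.pyGetD pvNotes (PySem.Int.mod (m + 1) 12) "" := by
  have h0 : 0 ≤ PySem.Int.mod m 12 := PySem.Int.mod_nonneg _ (by norm_num)
  have h2 : PySem.Int.mod m 12 < 12 := PySem.Int.mod_lt _ (by norm_num)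
  have hcast : PySem.Int.mod m 12 = ((PySem.Int.mod m 12).toNat : Int) := by omega
  rw [hcast, pvF_note (PySem.Int.mod m 12).toNat (by omega)]
  congr 1
  simp only [pvMod12]
  omega

lemma pvF_inj : ∀ a ∈ pvNotes, ∀ b ∈ pvNotes, pvF a = pvF b → a = b := by
  intro a ha b hb hab
  rcases List.getElem_of_mem ha with ⟨i, hi, rfl⟩
  rcases List.getElem_of_mem hb with ⟨j, hj, rfl⟩
  have hlen : pvNotes.length = 12 := rfl
  have hi12 : i < 12 := hlen ▸ hi
  have hj12 : j < 12 := hlen ▸ hj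
  have hmodi : PySem.Int.mod ((i : Int) + 1) 12 = (((i + 1) % 12 : Nat) : Int) := by
    simp only [pvMod12]; omega
  have hmodj : PySem.Int.mod ((j : Int) + 1) 12 = (((j + 1) % 12 : Nat) : Int) := by
    simp only [pvMod12]; omega
  have hi' : (i + 1) % 12 < pvNotes.length := by rw [hlen]; exact Nat.mod_lt _ (by norm_num)
  have hj' : (j + 1) % 12 < pvNotes.length := by rw [hlen]; exact Nat.mod_lt _ (by norm_num)
  have ei : pvF pvNotes[i] = pvNotes[(i + 1) % 12] :=
    (congrArg pvF (pvGetD_natIdx i hi).symm).trans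
      ((pvF_note i hi12).trans ((hmodi ▸ rfl : PySem.List.pyGetD pvNotes (PySem.Int.mod ((i : Int) + 1) 12) "" = PySem.List.pyGetD pvNotes (((i + 1) % 12 : Nat) : Int) "").trans (pvGetD_natIdx _ hi')))
  have ej : pvF pvNotes[j] = pvNotes[(j + 1) % 12] :=
    (congrArg pvF (pvGetD_natIdx j hj).symm).trans
      ((pvF_note j hj12).trans ((hmodj ▸ rfl : PySem.List.pyGetD pvNotes (PySem.Int.mod ((j : Int) + 1) 12) "" = PySem.List.pyGetD pvNotes (((j + 1) % 12 : Nat) : Int) "").trans (pvGetD_natIdx _ hj')))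
  have h2 : pvNotes[(i + 1) % 12] = pvNotes[(j + 1) % 12] := ei.symm.trans (hab.trans ej)
  have h3 : (i + 1) % 12 = (j + 1) % 12 := (List.Nodup.getElem_inj_iff pvNotes_nodup).mp h2
  have hij : i = j := by omega
  subst hij; rfl

lemma pvMap_mem (xs : List Int) (i : Int) :
    ∀ x ∈ xs.map (fun k => PySem.List.pyGetD pvNotes (PySem.Int.mod (k + i) 12) ""), x ∈ pvNotes := by
  intro x hx
  rcases List.mem_map.1 hx with ⟨k, _, rfl⟩
  refine PySem.List.pyGetD_mem _ _ ?_
  have h0 : 0 ≤ PySem.Int.mod (k + i) 12 := PySem.Int.mod_nonneg _ (by norm_num)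
  have h2 : PySem.Int.mod (k + i) 12 < 12 := PySem.Int.mod_lt _ (by norm_num)
  unfold PySem.Raise.InRange
  simp [pvNotes]
  omega

lemma foldl_add_map : ∀ (l s : List String), (∀ x ∈ l, x ∈ pvNotes) → (∀ x ∈ s, x ∈ pvNotes) →
    (List.foldl PySem.Set.add s l).map pvF = List.foldl PySem.Set.add (s.map pvF) (l.map pvF) := by
  intro l
  induction l with
  | nil => intro s _ _; simp
  | cons x t ih =>
    intro s hl hs
    have hx : x ∈ pvNotes := hl x (by simp)
    have hadd : (PySem.Set.add s x).map pvF = PySem.Set.add (s.map pvF) (pvF x) := by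
      by_cases hmem : x ∈ s
      · have h1 : pvF x ∈ s.map pvF := List.mem_map.2 ⟨x, hmem, rfl⟩
        simp [PySem.Set.add, hmem, h1]
      · have h2 : pvF x ∉ s.map pvF := by
          intro hc
          rcases List.mem_map.1 hc with ⟨y, hy, hfy⟩
          exact hmem (pvF_inj y (hs y hy) x hx hfy ▸ hy)
        simp [PySem.Set.add, hmem, h2]
    have hadds : ∀ y ∈ PySem.Set.add s x, y ∈ pvNotes := by
      intro y hy
      rcases (PySem.Set.mem_add _ _ _).1 hy with h | h
      · exact hs y h
      · exact h ▸ hx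
    simp only [List.map_cons, List.foldl_cons, ← hadd]
    exact ih (PySem.Set.add s x) (fun y hy => hl y (by simp [hy])) hadds

lemma map_pvF_ofList (l : List String) (hl : ∀ x ∈ l, x ∈ pvNotes) :
    (PySem.Set.ofList l).map pvF = PySem.Set.ofList (l.map pvF) := by
  have h := foldl_add_map l [] hl (by simp)
  simpa [PySem.Set.ofList_eq_foldl] using h

lemma pvS_succ (xs : List Int) (i : Int) : (pvS xs i).map pvF = pvS xs (i + 1) := by
  have h := map_pvF_ofList
    (xs.map (fun k => PySem.List.pyGetD pvNotes (PySem.Int.mod (k + i) 12) "")) (pvMap_mem xs i)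
  rw [pvS, pvS, h, List.map_map]
  congr 1
  apply List.map_congr_left
  intro k _
  have h2 := pvF_step (k + i)
  simpa [Function.comp, add_assoc] using h2

lemma pvS_ofList (xs : List Int) (i : Int) : PySem.Set.ofList (pvS xs i) = pvS xs i := by
  rw [pvS]; exact PySem.Set.ofList_ofList _

-- B's 11-step loop, with the invariant that the carried list is pvS xs t.
lemma loopB (xs : List Int) : ∀ (L : List Int) (t : Int) (acc : List (List String)),
    (L.foldl (fun (st : List (List String) × List String) _ =>
        (st.1 ++ [PySem.Set.ofList (st.2.map (fun n => (PySem.Dict.get? pvNext n).getD ""))],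
         st.2.map (fun n => (PySem.Dict.get? pvNext n).getD ""))) (acc, pvS xs t))
      = (acc ++ (List.range L.length).map (fun j : Nat => pvS xs (t + 1 + (j : Int))),
         pvS xs (t + (L.length : Int))) := by
  intro L
  induction L with
  | nil => intro t acc; simp
  | cons y L ih =>
    intro t acc
    have hprev : (pvS xs t).map (fun n => (PySem.Dict.get? pvNext n).getD "") = pvS xs (t + 1) :=
      pvS_succ xs t
    simp only [List.foldl_cons, hprev, pvS_ofList]
    rw [ih (t + 1) (acc ++ [pvS xs (t + 1)])]
    simp only [Prod.mk.injEq]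
    constructor
    · rw [List.append_assoc]
      congr 1
      rw [List.length_cons, List.range_succ_eq_map, List.map_cons, List.map_map]
      rw [List.singleton_append]
      congr 1
      · congr 1; norm_num
      · apply List.map_congr_left
        intro j _
        congr 1
        push_cast
        ring
    · congr 1
      simp only [List.length_cons]
      push_cast
      ring

lemma baseB (xs : List Int) :
    xs.foldl (fun b k =>
      let n := PySem.List.pyGetD pvNotes (PySem.Int.mod k 12) ""
      if b.contains n then b else b ++ [n]) [] = pvS xs 0 := by
  have h : xs.foldl (fun b k =>
      let n := PySem.List.pyGetD pvNotes (PySem.Int.mod k 12) ""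
      if b.contains n then b else b ++ [n]) []
      = List.foldl PySem.Set.add [] (xs.map (fun k => PySem.List.pyGetD pvNotes (PySem.Int.mod k 12) "")) := by
    rw [List.foldl_map]
    rfl
  rw [h, pvS]
  simp only [add_zero, PySem.Set.ofList_eq_foldl]

lemma pv_main (xs : List Int) : chord_to_chromatic_notes xs = chord_to_chromatic_notes_alt xs := by
  unfold chord_to_chromatic_notes chord_to_chromatic_notes_alt
  simp only [PySem.List.foldl_append_singleton_eq_map, List.nil_append, baseB xs, pvS_ofList]
  rw [loopB xs (PySem.List.pyRange 0 11 1) 0 [pvS xs 0]]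
  have hr : (PySem.List.pyRange 0 12 1) = [0,1,2,3,4,5,6,7,8,9,10,11] := by decide
  have hl11 : (PySem.List.pyRange 0 11 1).length = 11 := by decide
  have hrg : List.range 11 = [0,1,2,3,4,5,6,7,8,9,10] := by decide
  rw [hr, hl11, hrg]
  simp only [List.map_cons, List.map_nil, List.cons_append, List.nil_append]
  norm_num [pvS]

-- ===== VERDICT (by name: the statement is the Claim_ definition above) =====
theorem chord_to_chromatic_notes_spec : Claim_equal_chord_to_chromatic_notes := by
  intro xs _
  unfold Spec_chord_to_chromatic_notes
  exact pv_main xs
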